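-- pv_equiv track=rewrite | github.com/posl/comment_recommendation | script/split_gen/5_time/en/130_D/6.py | get_contiguous_subsequences
-- ===== SOURCE A (Python) =====
-- def get_contiguous_subsequences(a, k):
--     count = 0
--     for i in range(len(a)):
--         sum = 0
--         for j in range(i, len(a)):
--             sum += a[j]
--             if sum >= k:
--                 count += 1
--                 break
--     return count
-- ===== SOURCE B (Python) =====
-- def get_contiguous_subsequences(a, k):
--     # Scan right-to-left: m = max(0, best contiguous sum starting at position i+1).
--     # The best contiguous sum starting at i is a[i] + m; count positions where it >= k.
--     count = 0
--     m = 0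
--     for x in reversed(a):
--         t = x + m
--         if t >= k:
--             count += 1
--         m = t if t > 0 else 0
--     return count
-- ===== Notes on version B (the rewrite author's own statement) =====
-- stated objective: faster
-- what changed: Replaced the nested index loops (restarting the running sum at every start index) by a single right-to-left pass maintaining max(0, best contiguous sum starting at the next position), counting positions where a[i]+m >= k.
import Mathlib
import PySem

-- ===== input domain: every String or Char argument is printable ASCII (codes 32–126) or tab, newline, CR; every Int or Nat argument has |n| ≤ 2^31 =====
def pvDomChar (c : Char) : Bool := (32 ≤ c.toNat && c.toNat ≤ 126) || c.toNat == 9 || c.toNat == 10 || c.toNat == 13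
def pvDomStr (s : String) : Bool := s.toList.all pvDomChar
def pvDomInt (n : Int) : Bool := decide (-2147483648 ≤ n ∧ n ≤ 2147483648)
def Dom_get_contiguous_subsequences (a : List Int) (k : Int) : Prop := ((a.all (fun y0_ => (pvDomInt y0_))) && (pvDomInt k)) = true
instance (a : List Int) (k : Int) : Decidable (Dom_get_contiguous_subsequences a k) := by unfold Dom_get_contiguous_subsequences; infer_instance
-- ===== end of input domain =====

-- B replaces A's O(n^2) nested loops by one O(n) right-to-left pass (Kadane-style suffix maximum).

-- ===== PORT A =====
-- inner loop 'for j in range(i, len(a)): sum += a[j]; if sum >= k: count += 1; break'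
-- (pyGetD with default 0 is exact here: every j drawn from range(i, len(a)) is in range)
def pvInnerA (a : List Int) (k : Int) : List Int → Int → Int → Int
  | [], _, count => count
  | j :: js, s, count =>
      let s' := s + PySem.List.pyGetD a j 0
      if s' ≥ k then count + 1 else pvInnerA a k js s' count

def get_contiguous_subsequences (a : List Int) (k : Int) : Int :=
  (PySem.List.pyRange 0 a.length 1).foldl
    (fun count i => pvInnerA a k (PySem.List.pyRange i a.length 1) 0 count) 0

-- ===== PORT B =====
-- 'for x in reversed(a): t = x + m; if t >= k: count += 1; m = t if t > 0 else 0'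
def get_contiguous_subsequences_alt (a : List Int) (k : Int) : Int :=
  (a.reverse.foldl
    (fun (p : Int × Int) x =>
      let t := x + p.2
      ((if t ≥ k then p.1 + 1 else p.1), if t > 0 then t else 0)) (0, 0)).1

-- ===== PRECONDITION & SPEC =====
def Spec_get_contiguous_subsequences (a : List Int) (k : Int) (out : Int) : Prop := out = get_contiguous_subsequences_alt a k
instance (a : List Int) (k : Int) (out : Int) : Decidable (Spec_get_contiguous_subsequences a k out) := by unfold Spec_get_contiguous_subsequences; infer_instance

-- ===== CLAIM (what is proved, stated in full; the proofs are below) =====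
def Claim_equal_get_contiguous_subsequences : Prop := ∀ (a : List Int) (k : Int), Dom_get_contiguous_subsequences a k → Spec_get_contiguous_subsequences a k (get_contiguous_subsequences a k)

-- ===== LEMMAS AND PROOFS =====

-- pvM r = max(0, maximum sum of a nonempty prefix of r)
def pvM : List Int → Int
  | [] => 0
  | x :: r => if x + pvM r > 0 then x + pvM r else 0

-- pvC a k = number of suffixes of a whose best nonempty prefix sum reaches k
def pvC (k : Int) : List Int → Int
  | [] => 0
  | x :: r => if x + pvM r ≥ k then pvC k r + 1 else pvC k r

-- list-level version of A's inner loop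
def pvInner' (k : Int) : List Int → Int → Int → Int
  | [], _, count => count
  | x :: r, s, count => if s + x ≥ k then count + 1 else pvInner' k r (s + x) count

lemma pvM_nonneg (r : List Int) : 0 ≤ pvM r := by
  cases r with
  | nil => simp [pvM]
  | cons x r => simp only [pvM]; split_ifs with h <;> omega

-- B's reversed-fold computes (pvC, pvM)
lemma pvAlt_pair (k : Int) (a : List Int) :
    a.reverse.foldl
      (fun (p : Int × Int) x =>
        let t := x + p.2
        ((if t ≥ k then p.1 + 1 else p.1), if t > 0 then t else 0)) (0, 0)
      = (pvC k a, pvM a) := by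
  induction a with
  | nil => rfl
  | cons x r ih =>
      rw [List.reverse_cons, List.foldl_append, ih]
      simp only [List.foldl_cons, List.foldl_nil, pvC, pvM]

lemma pvAlt_eq (a : List Int) (k : Int) :
    get_contiguous_subsequences_alt a k = pvC k a := by
  unfold get_contiguous_subsequences_alt
  rw [pvAlt_pair]

-- A's inner loop over range(i, len a) is the list scan over the suffix drop i
lemma pvInnerA_eq_inner' (a : List Int) (k : Int) :
    ∀ (m i : Nat), a.length - i ≤ m → ∀ (s count : Int),
      pvInnerA a k (PySem.List.pyRange (i : Int) (a.length : Int) 1) s count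
        = pvInner' k (a.drop i) s count := by
  intro m
  induction m with
  | zero =>
      intro i hi s count
      have h1 : (a.length : Int) ≤ (i : Int) := by omega
      rw [PySem.List.pyRange_one_eq_nil h1, List.drop_eq_nil_of_le (by omega)]
      rfl
  | succ m ih =>
      intro i hi s count
      by_cases hlt : i < a.length
      · have h1 : (i : Int) < (a.length : Int) := by exact_mod_cast hlt
        rw [PySem.List.pyRange_one_cons h1]
        have hd : a.drop i = a[i] :: a.drop (i + 1) := List.drop_eq_getElem_cons hlt
        rw [hd]
        simp only [pvInnerA, pvInner', PySem.List.pyGetD_natCast,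
          List.getD_eq_getElem a 0 hlt]
        by_cases hk : s + a[i] ≥ k
        · simp [hk]
        · simp only [hk, if_false]
          rw [show ((i : Int) + 1) = ((i + 1 : Nat) : Int) by push_cast; ring]
          exact ih (i + 1) (by omega) _ _
      · have h1 : (a.length : Int) ≤ (i : Int) := by exact_mod_cast (by omega : a.length ≤ i)
        rw [PySem.List.pyRange_one_eq_nil h1, List.drop_eq_nil_of_le (by omega)]
        rfl

-- the scan adds 1 exactly when the running sum can reach k on some nonempty prefix
lemma pvInner'_closed (k : Int) :
    ∀ (r : List Int) (s count : Int),
      pvInner' k r s count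
        = count + (if r ≠ [] ∧ s + (r.headI + pvM r.tail) ≥ k then 1 else 0) := by
  intro r
  induction r with
  | nil => intro s count; simp [pvInner']
  | cons x r ih =>
      intro s count
      simp only [pvInner', List.headI_cons, List.tail_cons, ne_eq, reduceCtorEq,
        not_false_iff, true_and]
      by_cases hk : s + x ≥ k
      · rw [if_pos hk, if_pos (by have := pvM_nonneg r; omega)]
      · rw [if_neg hk, ih]
        cases r with
        | nil => simp [pvM, hk]
        | cons y r' =>
            simp only [List.headI_cons, List.tail_cons, ne_eq, reduceCtorEq,
              not_false_iff, true_and]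
            have hM : pvM (y :: r') = if y + pvM r' > 0 then y + pvM r' else 0 := rfl
            rw [hM]
            split_ifs with h1 h2 h2 <;> omega

-- the outer loop sums these indicators into pvC
lemma pvOuter (a : List Int) (k : Int) :
    ∀ (m i : Nat), a.length - i ≤ m → ∀ (count : Int),
      (PySem.List.pyRange (i : Int) (a.length : Int) 1).foldl
        (fun count j => pvInnerA a k (PySem.List.pyRange j (a.length : Int) 1) 0 count) count
        = count + pvC k (a.drop i) := by
  intro m
  induction m with
  | zero =>
      intro i hi count
      have h1 : (a.length : Int) ≤ (i : Int) := by omega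
      rw [PySem.List.pyRange_one_eq_nil h1, List.drop_eq_nil_of_le (by omega)]
      simp [pvC]
  | succ m ih =>
      intro i hi count
      by_cases hlt : i < a.length
      · have h1 : (i : Int) < (a.length : Int) := by exact_mod_cast hlt
        rw [PySem.List.pyRange_one_cons h1]
        simp only [List.foldl_cons]
        have hd : a.drop i = a[i] :: a.drop (i + 1) := List.drop_eq_getElem_cons hlt
        rw [pvInnerA_eq_inner' a k (a.length - i) i (by omega), pvInner'_closed,
          hd]
        rw [show ((i : Int) + 1) = ((i + 1 : Nat) : Int) by push_cast; ring,
          ih (i + 1) (by omega)]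
        simp only [List.headI_cons, List.tail_cons, ne_eq, reduceCtorEq, not_false_iff,
          true_and, pvC, zero_add]
        split_ifs with h <;> omega
      · have h1 : (a.length : Int) ≤ (i : Int) := by exact_mod_cast (by omega : a.length ≤ i)
        rw [PySem.List.pyRange_one_eq_nil h1, List.drop_eq_nil_of_le (by omega)]
        simp [pvC]

-- ===== VERDICT (by name: the statement is the Claim_ definition above) =====
theorem get_contiguous_subsequences_spec : Claim_equal_get_contiguous_subsequences := by
  intro a k _
  unfold Spec_get_contiguous_subsequences get_contiguous_subsequences
  rw [pvAlt_eq]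
  have h := pvOuter a k a.length 0 (by omega) 0
  simpa using h
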